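-- pv_equiv track=rewrite | github.com/jakubbrodzinski/aoc-2020 | day6/custom_customs.py | _count_always_valid_answers_within_group
-- ===== SOURCE A (Python) =====
-- def _count_always_valid_answers_within_group(entries: [str]) -> int:
--     first_group_answers = set()
--     for answer in entries[0]:
--         first_group_answers.add(answer)
--     first_group_answers = list(first_group_answers)
--
--     for entry in entries[1:]:
--         if len(first_group_answers) != 0:
--             first_group_answers = [answer for answer in first_group_answers if answer in entry]
--
--     return len(first_group_answers)
-- ===== SOURCE B (Python) =====
-- def _count_always_valid_answers_within_group(entries: [str]) -> int:
--     # Occurrence-counting algorithm: tally, for every answer character, in how many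
--     # group members it occurs (each member counted once via an ordered dedup), then
--     # count the characters whose tally equals the number of members.
--     n = len(entries)
--     tally = {}
--     for entry in entries:
--         for c in dict.fromkeys(entry):
--             tally[c] = tally.get(c, 0) + 1
--     total = 0
--     for v in tally.values():
--         if v == n:
--             total += 1
--     return total
-- ===== Notes on version B (the rewrite author's own statement) =====
-- stated objective: alternative
-- what changed: Replaces the sequential intersection (seed a set from entries[0], then repeatedly filter it through each remaining member) with an occurrence-counting algorithm: one dict tallies in how many members each character occurs, and the answer is the number of characters whose tally equals len(entries).
import Mathlib
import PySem

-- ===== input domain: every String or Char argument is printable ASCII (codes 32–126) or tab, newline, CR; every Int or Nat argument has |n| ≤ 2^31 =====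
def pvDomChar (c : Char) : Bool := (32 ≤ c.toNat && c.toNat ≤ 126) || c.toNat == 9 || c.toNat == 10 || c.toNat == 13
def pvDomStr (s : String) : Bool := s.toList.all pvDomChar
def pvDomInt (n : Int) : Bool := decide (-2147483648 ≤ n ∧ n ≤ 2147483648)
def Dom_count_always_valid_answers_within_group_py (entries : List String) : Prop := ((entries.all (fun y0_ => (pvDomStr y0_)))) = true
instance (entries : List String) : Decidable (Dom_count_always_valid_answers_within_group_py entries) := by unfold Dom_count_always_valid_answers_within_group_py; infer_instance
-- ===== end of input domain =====

-- ===== PORT A =====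
-- B changes: an occurrence-counting algorithm (tally per character, in how many members
-- it occurs) instead of A's sequential intersection by repeated filtering (objective:
-- alternative algorithm of similar cost).
-- Port notes for A: list(set(...)) iterates in hash order, but only the LENGTH of the final
-- list is returned and filtering is order-independent, so the Set's list order is never
-- observed. 'answer in entry' tests a 1-char string as substring = char membership (exact).
-- entries[0] raises IndexError on []: excluded by Pre_; the 'none' branch value 0 is unreachable under Pre_.
def count_always_valid_answers_within_group_py (entries : List String) : Int :=
  match PySem.List.pyGet? entries 0 with
  | none => 0
  | some first =>
    -- first_group_answers = set(); for answer in entries[0]: add; list(...)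
    let fga : List Char := first.toList.foldl PySem.Set.add PySem.Set.empty
    -- for entry in entries[1:]: if len != 0: filter
    let fga := (PySem.List.slice entries (some 1) none).foldl
      (fun acc entry =>
        if acc.length ≠ 0 then acc.filter (fun a => entry.toList.contains a) else acc) fga
    (fga.length : Int)

-- ===== PORT B =====
-- tally = {}; for entry in entries: for c in dict.fromkeys(entry): tally[c] = tally.get(c,0)+1;
-- then count the values equal to len(entries). dict.fromkeys(entry) is the ordered dedup.
def count_always_valid_answers_within_group_py_alt (entries : List String) : Int :=
  let n : Int := entries.length
  let tally : PySem.Dict Char Int := entries.foldl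
    (fun d entry => (PySem.List.dedup entry.toList).foldl (fun d c => d.modify c 0 (· + 1)) d)
    PySem.Dict.empty
  tally.values.foldl (fun total v => if v = n then total + 1 else total) 0

-- ===== PRECONDITION & SPEC =====
-- Pre_ excludes only the empty list, on which A raises IndexError (entries[0]).
def Pre_count_always_valid_answers_within_group_py (entries : List String) : Prop := entries ≠ []
instance (entries : List String) : Decidable (Pre_count_always_valid_answers_within_group_py entries) := by unfold Pre_count_always_valid_answers_within_group_py; infer_instance
def pvWitness_count_always_valid_answers_within_group_py : List String := ["abc", "cab"]
def Spec_count_always_valid_answers_within_group_py (entries : List String) (out : Int) : Prop := out = count_always_valid_answers_within_group_py_alt entries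
instance (entries : List String) (out : Int) : Decidable (Spec_count_always_valid_answers_within_group_py entries out) := by unfold Spec_count_always_valid_answers_within_group_py; infer_instance

-- ===== CLAIM (what is proved, stated in full; the proofs are below) =====
def Claim_equal_count_always_valid_answers_within_group_py : Prop := ∀ (entries : List String), Dom_count_always_valid_answers_within_group_py entries → Pre_count_always_valid_answers_within_group_py entries → Spec_count_always_valid_answers_within_group_py entries (count_always_valid_answers_within_group_py entries)

-- ===== LEMMAS AND PROOFS =====

-- A's loop body: the emptiness guard is redundant (filtering [] gives []) and the
-- filter is exactly Set.inter with the entry's characters.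
theorem pv_step_eq (acc : List Char) (e : String) :
    (if acc.length ≠ 0 then acc.filter (fun a => e.toList.contains a) else acc)
      = PySem.Set.inter acc e.toList := by
  cases acc with
  | nil => simp [PySem.Set.inter]
  | cons x xs => simp [PySem.Set.inter]

-- Membership in A's intersection fold.
theorem pv_mem_inter_fold (l : List String) (acc : List Char) (c : Char) :
    c ∈ l.foldl (fun acc e => PySem.Set.inter acc e.toList) acc
      ↔ c ∈ acc ∧ ∀ e ∈ l, c ∈ e.toList := by
  induction l generalizing acc with
  | nil => simp
  | cons e l ih =>
    simp only [List.foldl_cons, ih, PySem.Set.mem_inter, List.mem_cons]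
    constructor
    · rintro ⟨⟨h1, h2⟩, h3⟩
      refine ⟨h1, ?_⟩
      rintro x (rfl | hx)
      · exact h2
      · exact h3 x hx
    · rintro ⟨h1, h2⟩
      exact ⟨⟨h1, h2 e (Or.inl rfl)⟩, fun x hx => h2 x (Or.inr hx)⟩

theorem pv_nodup_inter_fold (l : List String) (acc : List Char) (h : acc.Nodup) :
    (l.foldl (fun acc e => PySem.Set.inter acc e.toList) acc).Nodup := by
  induction l generalizing acc with
  | nil => exact h
  | cons e l ih => exact ih _ (PySem.Set.nodup_inter _ _ h)

-- B's tally: each character's final count is the number of members containing it.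
theorem pv_tally_getD (l : List String) (d : PySem.Dict Char Int) (c : Char) :
    (l.foldl (fun d entry => (PySem.List.dedup entry.toList).foldl
        (fun d c => d.modify c 0 (· + 1)) d) d).getD c 0
      = d.getD c 0 + (l.countP (fun e => decide (c ∈ e.toList)) : Int) := by
  induction l generalizing d with
  | nil => simp
  | cons e l ih =>
    simp only [List.foldl_cons, ih, PySem.Dict.getD_foldl_modify_add_one,
      List.countP_cons]
    have hcount : List.count c (PySem.List.dedup e.toList)
        = if c ∈ e.toList then 1 else 0 := by
      by_cases hm : c ∈ e.toList
      · rw [if_pos hm]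
        exact List.count_eq_one_of_mem (by simp [PySem.List.dedup_eq_ofList, PySem.Set.nodup_ofList])
          (by simp [PySem.List.dedup_eq_ofList, PySem.Set.mem_ofList, hm])
      · rw [if_neg hm, List.count_eq_zero]
        simp [PySem.List.dedup_eq_ofList, PySem.Set.mem_ofList, hm]
    rw [hcount]
    by_cases hm : c ∈ e.toList
    · simp only [hm, if_pos, decide_true]
      push_cast
      ring
    · simp only [hm, decide_false]
      norm_num

-- B's tally keys: the distinct characters occurring in some member, without duplicates.
theorem pv_tally_keys_mem (l : List String) (d : PySem.Dict Char Int) (c : Char) :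
    c ∈ (l.foldl (fun d entry => (PySem.List.dedup entry.toList).foldl
        (fun d c => d.modify c 0 (· + 1)) d) d).keys
      ↔ c ∈ d.keys ∨ ∃ e ∈ l, c ∈ e.toList := by
  induction l generalizing d with
  | nil => simp
  | cons e l ih =>
    rw [List.foldl_cons, ih]
    have hk := PySem.Dict.keys_foldl_modify (PySem.List.dedup e.toList) 0 (fun _ _ v => v + 1) d
    rw [hk]
    simp only [PySem.Set.mem_update, PySem.List.dedup_eq_ofList, PySem.Set.mem_ofList,
      List.mem_cons]
    constructor
    · rintro ((h | h) | ⟨x, hx, hc⟩)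
      · exact Or.inl h
      · exact Or.inr ⟨e, Or.inl rfl, h⟩
      · exact Or.inr ⟨x, Or.inr hx, hc⟩
    · rintro (h | ⟨x, (rfl | hx), hc⟩)
      · exact Or.inl (Or.inl h)
      · exact Or.inl (Or.inr hc)
      · exact Or.inr ⟨x, hx, hc⟩

theorem pv_tally_keys_nodup (l : List String) (d : PySem.Dict Char Int)
    (h : d.keys.Nodup) :
    (l.foldl (fun d entry => (PySem.List.dedup entry.toList).foldl
        (fun d c => d.modify c 0 (· + 1)) d) d).keys.Nodup := by
  induction l generalizing d with
  | nil => exact h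
  | cons e l ih =>
    exact ih _ (PySem.Dict.nodup_keys_foldl_modify_key _ (fun c => c) 0 (fun _ _ v => v + 1) d h)

-- ===== VERDICT (by name: the statement is the Claim_ definition above) =====
theorem count_always_valid_answers_within_group_py_spec : Claim_equal_count_always_valid_answers_within_group_py := by
  intro entries _ hpre
  unfold Spec_count_always_valid_answers_within_group_py
  unfold count_always_valid_answers_within_group_py count_always_valid_answers_within_group_py_alt
  cases entries with
  | nil => exact absurd rfl hpre
  | cons first rest =>
    have h0 : PySem.List.pyGet? (first :: rest) (0 : Int) = some first := by
      simp [PySem.List.pyGet?, PySem.List.pyIdx?]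
    rw [h0, PySem.List.slice_from_one]
    simp only [List.tail_cons]
    -- A's side: turn the guarded filter fold into the intersection fold
    have hstep : ∀ (acc : List Char),
        rest.foldl (fun acc entry =>
          if acc.length ≠ 0 then acc.filter (fun a => entry.toList.contains a) else acc) acc
        = rest.foldl (fun acc e => PySem.Set.inter acc e.toList) acc := by
      intro acc
      induction rest generalizing acc with
      | nil => rfl
      | cons e l ih => simp only [List.foldl_cons, pv_step_eq]
    rw [hstep]
    have hseed : first.toList.foldl PySem.Set.add PySem.Set.empty
        = PySem.Set.ofList first.toList := by
      rw [PySem.Set.ofList_eq_foldl]; rfl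
    rw [hseed]
    -- names
    set entries := first :: rest with hentries
    set LA := rest.foldl (fun acc e => PySem.Set.inter acc e.toList)
        (PySem.Set.ofList first.toList) with hLA
    set tally : PySem.Dict Char Int := entries.foldl
        (fun d entry => (PySem.List.dedup entry.toList).foldl
          (fun d c => d.modify c 0 (· + 1)) d) PySem.Dict.empty with htally
    -- B's counting loop is countP over the values
    have hcif := PySem.List.foldl_count_if (fun v => decide (v = (entries.length : Int)))
      tally.values 0
    simp only [decide_eq_true_eq] at hcif
    rw [hcif, zero_add]
    -- values = items.map snd; countP over items; each item's value is determined by its key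
    have hknodup : tally.keys.Nodup := by
      rw [htally]; exact pv_tally_keys_nodup _ _ (by simp)
    have hval : ∀ p ∈ tally.items,
        (decide (p.2 = (entries.length : Int)) = true)
          ↔ (decide ((entries.countP (fun e => decide (p.1 ∈ e.toList)) : Int) = (entries.length : Int)) = true) := by
      rintro ⟨k, v⟩ hp
      have : tally.getD k 0 = v := PySem.Dict.getD_of_mem_items tally hp hknodup 0
      have hv : v = (entries.countP (fun e => decide (k ∈ e.toList)) : Int) := by
        rw [← this, htally, pv_tally_getD]; simp
      simp [hv]
    have hcount : tally.values.countP (fun v => decide (v = (entries.length : Int)))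
        = tally.keys.countP (fun c =>
            decide ((entries.countP (fun e => decide (c ∈ e.toList)) : Int) = (entries.length : Int))) := by
      show (tally.items.map (·.2)).countP _ = (tally.items.map (·.1)).countP _
      rw [List.countP_map, List.countP_map]
      exact List.countP_congr hval
    rw [hcount]
    -- the filtered keys are a permutation of A's intersection list
    set pred : Char → Bool := fun c =>
      decide ((entries.countP (fun e => decide (c ∈ e.toList)) : Int) = (entries.length : Int)) with hpred
    have hperm : LA.Perm (tally.keys.filter pred) := by
      rw [List.perm_ext_iff_of_nodup
        (pv_nodup_inter_fold _ _ (PySem.Set.nodup_ofList _))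
        (List.Nodup.filter _ hknodup)]
      intro c
      rw [pv_mem_inter_fold, List.mem_filter]
      have hpredc : pred c = true ↔ ∀ e ∈ entries, c ∈ e.toList := by
        rw [hpred]
        simp only [decide_eq_true_eq, Int.natCast_inj]
        rw [List.countP_eq_length]
        simp
      constructor
      · rintro ⟨h1, h2⟩
        have hall : ∀ e ∈ entries, c ∈ e.toList := by
          intro e he
          rcases List.mem_cons.mp he with rfl | he
          · exact (PySem.Set.mem_ofList _ _).mp h1
          · exact h2 e he
        refine ⟨?_, hpredc.mpr hall⟩
        rw [htally, pv_tally_keys_mem]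
        exact Or.inr ⟨first, List.mem_cons_self, hall first List.mem_cons_self⟩
      · rintro ⟨_, h2⟩
        have hall := hpredc.mp h2
        exact ⟨(PySem.Set.mem_ofList _ _).mpr (hall first List.mem_cons_self),
          fun e he => hall e (List.mem_cons_of_mem _ he)⟩
    rw [hperm.length_eq, List.countP_eq_length_filter]
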